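-- pv_equiv track=rewrite | github.com/Engineer-D/Algorithm_and_Data_Structure_Self_Learning | JumpyHumpy.py | jumpyHumpy
-- ===== SOURCE A (Python) =====
-- def jumpyHumpy(size, arr = [],):
--     arrSize = len(arr)
--     stamina = []
--     strength = 0
--
--     if size != arrSize:
--         return -1
--
--     for i in range(arrSize):
--         strength = strength^arr[i]
--         nextPos = i+1
--         pos = i
--         while nextPos < arrSize:
--             if arr[pos] < arr[nextPos]:
--                 strength = strength ^ arr[nextPos]
--                 pos = nextPos
--                 nextPos += 1
--
--             else:
--                 nextPos += 1
--
--         stamina.append(strength)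
--         strength = 0
--     return max(stamina)
-- ===== SOURCE B (Python) =====
-- def jumpyHumpy(size, arr = [],):
--     # Stack-based next-greater-element DP, right to left: f(i) = arr[i] ^ f(nge(i)).
--     n = len(arr)
--     if size != n:
--         return -1
--     stack = []   # pairs (value, chain_xor); values strictly increasing from top of stack
--     best = None
--     for v in reversed(arr):
--         while stack and stack[-1][0] <= v:
--             stack.pop()
--         f = v ^ (stack[-1][1] if stack else 0)
--         stack.append((v, f))
--         if best is None or f > best:
--             best = f
--     return best
-- ===== Notes on version B (the rewrite author's own statement) =====
-- stated objective: alternative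
-- what changed: Replaces the per-start rescans (for each i, walk right greedily to each next-greater element) by a single right-to-left pass that maintains a monotonic stack of (value, chain-xor) pairs, so f(i) = arr[i] ^ f(next_greater(i)) is computed once per index.
-- outside the precondition, e.g. on jumpyHumpy(0, []): A raises ValueError, B returns None
import Mathlib
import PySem

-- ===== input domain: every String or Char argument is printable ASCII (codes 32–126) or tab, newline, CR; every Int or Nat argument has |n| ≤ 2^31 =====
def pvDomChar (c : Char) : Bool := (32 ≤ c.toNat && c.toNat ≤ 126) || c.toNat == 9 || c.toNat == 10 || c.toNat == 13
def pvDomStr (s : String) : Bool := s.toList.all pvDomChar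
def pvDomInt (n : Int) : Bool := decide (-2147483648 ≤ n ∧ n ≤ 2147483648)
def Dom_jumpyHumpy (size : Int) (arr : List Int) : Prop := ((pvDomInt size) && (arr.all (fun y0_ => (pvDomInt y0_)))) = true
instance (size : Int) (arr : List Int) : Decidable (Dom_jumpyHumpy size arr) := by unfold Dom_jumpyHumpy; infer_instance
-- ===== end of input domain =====

-- B replaces A's per-start greedy rescans by one right-to-left monotonic-stack DP pass
-- (f(i) = arr[i] ^ f(next_greater(i))); equivalence is proved on all inputs where A returns.


-- ===== PORT A =====
-- A's inner `while nextPos < arrSize` loop, verbatim.  arr[pos]/arr[nextPos] are ported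
-- as getD _ 0: on every executed path the index is in range (nextPos is guarded, pos starts
-- at i < n and is only ever set to a guarded nextPos), so the default is never consulted.
def innerA (arr : List Int) (arrSize : Nat) (strength : Int) (pos nextPos : Nat) : Int :=
  if nextPos < arrSize then
    if arr.getD pos 0 < arr.getD nextPos 0 then
      innerA arr arrSize (PySem.Int.bxor strength (arr.getD nextPos 0)) nextPos (nextPos + 1)
    else
      innerA arr arrSize strength pos (nextPos + 1)
  else strength
termination_by arrSize - nextPos

def jumpyHumpy (size : Int) (arr : List Int) : Int :=
  let arrSize := arr.length
  if size ≠ (arrSize : Int) then -1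
  else
    -- for i in range(arrSize): strength = 0 ^ arr[i]; inner while loop; stamina.append(strength)
    let stamina := (List.range arrSize).foldl
      (fun st i => st ++ [innerA arr arrSize (PySem.Int.bxor 0 (arr.getD i 0)) i (i + 1)]) []
    match PySem.List.max? stamina (fun y => y) with
    | some m => m
    | none => 0   -- unreachable under Pre_: Python's max([]) raises ValueError here

-- ===== PORT B =====
-- one loop step of Source B: pop stack while top value ≤ v, f = v ^ (top chain-xor or 0),
-- push (v, f), update the running best (Source B's `if best is None or f > best`).
def stepB (st : List (Int × Int) × Option Int) (v : Int) : List (Int × Int) × Option Int :=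
  let s := st.1.dropWhile (fun p => p.1 ≤ v)
  let f := PySem.Int.bxor v (match s.head? with | some p => p.2 | none => 0)
  ((v, f) :: s, some (match st.2 with | some b => if b < f then f else b | none => f))

def jumpyHumpy_alt (size : Int) (arr : List Int) : Int :=
  let n := arr.length
  if size ≠ (n : Int) then -1
  else
    let st := arr.reverse.foldl stepB ([], none)
    match st.2 with
    | some b => b
    | none => 0   -- unreachable under Pre_: Python's B returns None (not an int) here

-- ===== PRECONDITION & SPEC =====
-- Pre_ excludes only (size = 0, arr = []): there Python A reaches max([]) and raises ValueError
-- (and Python B returns None, not an int).  Every other input is admitted.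
def Pre_jumpyHumpy (size : Int) (arr : List Int) : Prop := ¬(size = 0 ∧ arr = [])
instance (size : Int) (arr : List Int) : Decidable (Pre_jumpyHumpy size arr) := by
  unfold Pre_jumpyHumpy; infer_instance

def pvWitness_jumpyHumpy : Int × List Int := (4, [5, 1, 6, 2])

def Spec_jumpyHumpy (size : Int) (arr : List Int) (out : Int) : Prop := out = jumpyHumpy_alt size arr
instance (size : Int) (arr : List Int) (out : Int) : Decidable (Spec_jumpyHumpy size arr out) := by
  unfold Spec_jumpyHumpy; infer_instance

-- ===== CLAIM (what is proved, stated in full; the proofs are below) =====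
def Claim_equal_jumpyHumpy : Prop := ∀ (size : Int) (arr : List Int), Dom_jumpyHumpy size arr → Pre_jumpyHumpy size arr → Spec_jumpyHumpy size arr (jumpyHumpy size arr)

-- ===== LEMMAS AND PROOFS =====

-- ---- two's-complement xor: algebraic facts about PySem.Int.bxor ----
def pvMag (a : Int) : Nat := if 0 ≤ a then a.toNat else (-a - 1).toNat
def pvSgn (a : Int) : Bool := decide (a < 0)
def pvDec (n : Nat) (s : Bool) : Int := if s then -(n : Int) - 1 else (n : Int)

theorem bxor_dec (a b : Int) :
    PySem.Int.bxor a b = pvDec (pvMag a ^^^ pvMag b) (xor (pvSgn a) (pvSgn b)) := by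
  unfold PySem.Int.bxor pvMag pvSgn pvDec
  rcases le_or_gt 0 a with ha | ha <;> rcases le_or_gt 0 b with hb | hb
  · simp [ha, hb, not_lt.mpr ha, not_lt.mpr hb]
  · simp [ha, hb, not_lt.mpr ha, not_le.mpr hb]
  · simp [ha, hb, not_le.mpr ha, not_lt.mpr hb]
  · simp [ha, hb, not_le.mpr ha, not_le.mpr hb]

theorem pvMag_dec (n : Nat) (s : Bool) : pvMag (pvDec n s) = n := by
  cases s <;> (simp [pvMag, pvDec]; try omega)

theorem pvSgn_dec (n : Nat) (s : Bool) : pvSgn (pvDec n s) = s := by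
  cases s <;> (simp [pvSgn, pvDec]; try omega)

theorem bxor_assoc (a b c : Int) :
    PySem.Int.bxor (PySem.Int.bxor a b) c = PySem.Int.bxor a (PySem.Int.bxor b c) := by
  rw [bxor_dec a b, bxor_dec b c, bxor_dec, bxor_dec, pvMag_dec, pvSgn_dec, pvMag_dec, pvSgn_dec,
    Nat.xor_assoc, Bool.xor_assoc]

theorem zero_bxor (a : Int) : PySem.Int.bxor 0 a = a := by
  rw [PySem.Int.bxor_comm]; exact PySem.Int.bxor_zero a

-- ---- the common specification: next-greater scan and per-start chain xor ----
-- first index j ∈ [k, arr.length) with v < arr[j]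
def scanNge (arr : List Int) (v : Int) (k : Nat) : Option Nat :=
  if k < arr.length then
    (if v < arr.getD k 0 then some k else scanNge arr v (k + 1))
  else none
termination_by arr.length - k

theorem scanNge_some (arr : List Int) (v : Int) (k j : Nat)
    (h : scanNge arr v k = some j) : k ≤ j ∧ j < arr.length ∧ v < arr.getD j 0 := by
  fun_induction scanNge arr v k with
  | case1 k hk hlt => simp_all
  | case2 k hk hlt ih => have := ih h; omega
  | case3 k hk => simp_all

-- g arr i = xor along the greedy right-increasing chain starting at i
def g (arr : List Int) (i : Nat) : Int :=
  PySem.Int.bxor (arr.getD i 0)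
    (match h : scanNge arr (arr.getD i 0) (i + 1) with
     | some j => g arr j
     | none => 0)
termination_by arr.length - i
decreasing_by
  have := scanNge_some arr (arr.getD i 0) (i + 1) j h
  omega

def tailX (arr : List Int) (v : Int) (k : Nat) : Int :=
  match scanNge arr v k with
  | some j => g arr j
  | none => 0

theorem g_eq (arr : List Int) (i : Nat) :
    g arr i = PySem.Int.bxor (arr.getD i 0) (tailX arr (arr.getD i 0) (i + 1)) := by
  rw [g]; unfold tailX
  cases h : scanNge arr (arr.getD i 0) (i + 1) <;> simp

-- ---- A's inner loop computes s ^ tailX ----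
theorem innerA_eq (arr : List Int) (s : Int) (pos k : Nat) :
    innerA arr arr.length s pos k = PySem.Int.bxor s (tailX arr (arr.getD pos 0) k) := by
  fun_induction innerA arr arr.length s pos k with
  | case1 s pos k hk hlt ih =>
    rw [ih, bxor_assoc, ← g_eq]
    have hscan : scanNge arr (arr.getD pos 0) k = some k := by
      rw [scanNge]; rw [if_pos hk, if_pos hlt]
    unfold tailX
    rw [hscan]
  | case2 s pos k hk hlt ih =>
    have hscan : scanNge arr (arr.getD pos 0) k = scanNge arr (arr.getD pos 0) (k + 1) := by
      rw [scanNge]; rw [if_pos hk, if_neg hlt]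
    rw [ih]
    unfold tailX
    rw [hscan]
  | case3 s pos k hk =>
    have hscan : scanNge arr (arr.getD pos 0) k = none := by
      rw [scanNge]; rw [if_neg hk]
    unfold tailX
    rw [hscan, PySem.Int.bxor_zero]

-- ---- running maximum machinery ----
def mstep (acc : Option Int) (x : Int) : Option Int :=
  match acc with
  | none => some x
  | some b => some (max b x)

def Mx (l : List Int) : Option Int := l.foldl mstep none

theorem mstep_comm (acc : Option Int) (x y : Int) :
    mstep (mstep acc x) y = mstep (mstep acc y) x := by
  cases acc <;> simp [mstep, max_comm, max_left_comm]

theorem foldl_mstep_swap (l : List Int) : ∀ (acc : Option Int) (x : Int),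
    mstep (l.foldl mstep acc) x = l.foldl mstep (mstep acc x) := by
  induction l with
  | nil => intro acc x; rfl
  | cons y t ih => intro acc x; simp only [List.foldl_cons]; rw [ih, mstep_comm]

theorem Mx_append_singleton (l : List Int) (x : Int) : Mx (l ++ [x]) = mstep (Mx l) x := by
  simp [Mx, List.foldl_append]

theorem Mx_reverse (l : List Int) : Mx l.reverse = Mx l := by
  induction l with
  | nil => rfl
  | cons x t ih =>
    rw [List.reverse_cons, Mx_append_singleton, ih]
    show mstep (t.foldl mstep none) x = Mx (x :: t)
    rw [foldl_mstep_swap]; rfl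

theorem foldl_mstep_some (l : List Int) : ∀ x : Int,
    l.foldl mstep (some x) = some (l.foldl max x) := by
  induction l with
  | nil => intro x; rfl
  | cons y t ih => intro x; simp only [List.foldl_cons]; rw [show mstep (some x) y = some (max x y) from rfl, ih]

theorem max?_eq_Mx (l : List Int) : PySem.List.max? l (fun y => y) = Mx l := by
  cases l with
  | nil => simp [PySem.List.max?_eq_none_iff, Mx]
  | cons x t => rw [PySem.List.max?_id_cons]; show _ = t.foldl mstep (mstep none x); rw [show mstep none x = some x from rfl, foldl_mstep_some]

-- ---- A's outer loop: stamina is the list of chain xors ----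
theorem foldl_append_singleton (h : Nat → Int) (l : List Nat) : ∀ (st : List Int),
    l.foldl (fun st i => st ++ [h i]) st = st ++ l.map h := by
  induction l with
  | nil => intro st; simp
  | cons x t ih => intro st; simp [ih]

-- ---- B's monotonic stack ----
-- indices on B's stack after the elements at positions ≥ i have been processed
def stk (arr : List Int) (i : Nat) : List Nat :=
  if h : i < arr.length then
    i :: (stk arr (i + 1)).dropWhile (fun j => arr.getD j 0 ≤ arr.getD i 0)
  else []
termination_by arr.length - i

theorem dropWhile_dropWhile {α : Type} (p q : α → Bool) (himp : ∀ x, q x = true → p x = true)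
    (l : List α) : (l.dropWhile q).dropWhile p = l.dropWhile p := by
  induction l with
  | nil => rfl
  | cons x t ih =>
    by_cases hq : q x = true
    · rw [List.dropWhile_cons_of_pos hq, List.dropWhile_cons_of_pos (himp x hq), ih]
    · rw [List.dropWhile_cons_of_neg hq]

-- the first stack entry with value > v is the first array entry > v
theorem stk_head (arr : List Int) (v : Int) (i : Nat) :
    ((stk arr i).dropWhile (fun j => arr.getD j 0 ≤ v)).head? = scanNge arr v i := by
  fun_induction stk arr i with
  | case1 i hi ih =>
    by_cases hle : arr.getD i 0 ≤ v
    · have hsc : scanNge arr v i = scanNge arr v (i + 1) := by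
        rw [scanNge]; rw [if_pos hi, if_neg (by omega)]
      rw [List.dropWhile_cons_of_pos (by simpa using hle),
        dropWhile_dropWhile _ _
          (fun j hj => by simp only [decide_eq_true_eq] at hj ⊢; omega) (stk arr (i + 1)),
        ih, hsc]
    · have hsc : scanNge arr v i = some i := by
        rw [scanNge]; rw [if_pos hi, if_pos (by omega)]
      rw [List.dropWhile_cons_of_neg (by simpa using hle), hsc]
      rfl
  | case2 i hi =>
    have hsc : scanNge arr v i = none := by rw [scanNge]; rw [if_neg hi]
    rw [hsc]
    rfl

-- the whole right-to-left fold: stack = g-decorated stk, best = running max of g over [i, n)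
theorem foldB (arr : List Int) : ∀ (m i : Nat), i + m = arr.length →
    ((arr.drop i).reverse).foldl stepB ([], none)
      = ((stk arr i).map (fun j => (arr.getD j 0, g arr j)),
         Mx (((List.range' i m).map (g arr)).reverse)) := by
  intro m
  induction m with
  | zero =>
    intro i hi
    have : arr.drop i = [] := by rw [List.drop_eq_nil_iff]; omega
    rw [this, stk, dif_neg (by omega)]
    rfl
  | succ m ih =>
    intro i hi
    have hlt : i < arr.length := by omega
    rw [List.drop_eq_getElem_cons hlt, List.reverse_cons, List.foldl_append,
      ih (i + 1) (by omega)]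
    have hgetD : arr[i] = arr.getD i 0 := (List.getD_eq_getElem arr 0 hlt).symm
    -- unfold one stepB
    show stepB _ _ = _
    unfold stepB
    simp only []
    -- the popped stack
    have hpop : ((stk arr (i + 1)).map (fun j => (arr.getD j 0, g arr j))).dropWhile
          (fun p => p.1 ≤ arr[i])
        = ((stk arr (i + 1)).dropWhile (fun j => arr.getD j 0 ≤ arr.getD i 0)).map
          (fun j => (arr.getD j 0, g arr j)) := by
      rw [List.dropWhile_map]; rw [hgetD]; rfl
    rw [hpop]
    -- the found chain-xor equals tailX
    have hhead : (((stk arr (i + 1)).dropWhile (fun j => arr.getD j 0 ≤ arr.getD i 0)).map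
          (fun j => (arr.getD j 0, g arr j))).head?
        = (scanNge arr (arr.getD i 0) (i + 1)).map (fun j => (arr.getD j 0, g arr j)) := by
      rw [List.head?_map, stk_head]
    rw [hhead]
    have hf : PySem.Int.bxor arr[i]
        (match (scanNge arr (arr.getD i 0) (i + 1)).map (fun j => (arr.getD j 0, g arr j)) with
         | some p => p.2 | none => 0) = g arr i := by
      rw [hgetD, g_eq]
      unfold tailX
      cases scanNge arr (arr.getD i 0) (i + 1) <;> rfl
    rw [hf]
    have hstk : stk arr i
        = i :: (stk arr (i + 1)).dropWhile (fun j => arr.getD j 0 ≤ arr.getD i 0) := by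
      rw [stk]; rw [dif_pos hlt]
    rw [hstk, List.map_cons, hgetD]
    apply Prod.ext
    · rfl
    · -- best component
      show some _ = Mx ((List.map (g arr) (List.range' i (m + 1))).reverse)
      rw [List.range'_succ, List.map_cons, List.reverse_cons, Mx_append_singleton]
      cases hB : Mx ((List.map (g arr) (List.range' (i + 1) m)).reverse) with
      | none => rfl
      | some b =>
        show some (if b < g arr i then g arr i else b) = mstep (some b) (g arr i)
        unfold mstep
        congr 1
        rcases lt_or_ge b (g arr i) with h | h
        · rw [if_pos h, max_eq_right (le_of_lt h)]
        · rw [if_neg (not_lt.mpr h), max_eq_left h]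

-- ===== VERDICT (by name: the statement is the Claim_ definition above) =====
theorem jumpyHumpy_spec : Claim_equal_jumpyHumpy := by
  intro size arr _hdom hpre
  unfold Spec_jumpyHumpy jumpyHumpy jumpyHumpy_alt
  by_cases hsz : size ≠ (arr.length : Int)
  · rw [if_pos hsz, if_pos hsz]
  · rw [if_neg hsz, if_neg hsz]
    -- A's stamina list is exactly map g (range n)
    rw [foldl_append_singleton, List.nil_append]
    have hsta : (List.range arr.length).map
        (fun i => innerA arr arr.length (PySem.Int.bxor 0 (arr.getD i 0)) i (i + 1))
        = (List.range arr.length).map (g arr) := by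
      apply List.map_congr_left
      intro i _
      rw [innerA_eq, zero_bxor, ← g_eq]
    rw [hsta]
    -- B's fold over the whole reversed list
    have hB := foldB arr arr.length 0 (by omega)
    rw [List.drop_zero] at hB
    simp only [max?_eq_Mx, hB, Mx_reverse, ← List.range_eq_range']
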